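-- pv_equiv track=rewrite | github.com/Yumilicious303/leetcode | greedy/1899_MergeTriplets.py | mergeTripletsNeet
-- ===== SOURCE A (Python) =====
-- def mergeTripletsNeet(triplets, target):
--     good = set()
--
--     for t in triplets:
--         if t[0] > target[0] or t[1] > target[1] or t[2] > target[2]:
--             continue
--
--         for i, n in enumerate(t):
--             if n == target[i]:
--                 good.add(i)
--
--     return len(good) == 3
-- ===== SOURCE B (Python) =====
-- def mergeTripletsNeet(triplets, target):
--     valid = [t for t in triplets
--              if t[0] <= target[0] and t[1] <= target[1] and t[2] <= target[2]]
--     return all(any(t[i] == target[i] for t in valid) for i in range(3))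
-- ===== Notes on version B (the rewrite author's own statement) =====
-- stated objective: simpler
-- what changed: Instead of accumulating a set of matched indices row by row with an inner enumerate loop, B filters the usable rows once and checks column-wise that each of the 3 coordinates is matched by some usable row; Pre_ excludes inputs where a row that survives the filter is not a genuine length-3 triplet, since there A's enumerate-over-the-whole-row behaviour is an accident of its implementation.
-- outside the precondition, e.g. on mergeTripletsNeet([[1, 1, 1, 1]], [1, 1, 1, 1]): A returns False, B returns True
import Mathlib
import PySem

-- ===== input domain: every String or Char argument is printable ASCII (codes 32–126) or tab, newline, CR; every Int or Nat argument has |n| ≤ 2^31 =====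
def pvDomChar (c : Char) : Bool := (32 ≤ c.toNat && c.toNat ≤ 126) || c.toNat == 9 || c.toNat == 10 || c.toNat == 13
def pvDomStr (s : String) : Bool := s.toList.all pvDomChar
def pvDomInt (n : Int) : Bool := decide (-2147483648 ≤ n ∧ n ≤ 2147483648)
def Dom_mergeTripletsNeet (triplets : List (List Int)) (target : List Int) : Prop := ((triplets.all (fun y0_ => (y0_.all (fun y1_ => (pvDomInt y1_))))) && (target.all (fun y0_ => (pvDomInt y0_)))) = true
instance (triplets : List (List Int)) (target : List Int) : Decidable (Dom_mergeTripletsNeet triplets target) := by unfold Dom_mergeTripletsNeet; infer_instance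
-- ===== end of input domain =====

-- B replaces A's row-wise accumulation of a set of matched indices with a column-wise
-- check: filter the usable rows once, then check each of the 3 coordinates is matched.
-- Objective: simpler (same cost, shorter column-wise formulation).

-- ===== PORT A =====
-- indexing t[i] / target[i] is ported as the totalized PySem.List.pyGetD … 0;
-- Pre_ keeps every index Python actually evaluates in range, where the two coincide.
def mergeTripletsNeet (triplets : List (List Int)) (target : List Int) : Bool :=
  let good : PySem.Set Int :=
    triplets.foldl (fun good t =>
      if PySem.List.pyGetD t 0 0 > PySem.List.pyGetD target 0 0 ∨
         PySem.List.pyGetD t 1 0 > PySem.List.pyGetD target 1 0 ∨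
         PySem.List.pyGetD t 2 0 > PySem.List.pyGetD target 2 0 then
        good
      else
        (PySem.List.enumerate t).foldl
          (fun good p =>
            if p.2 == PySem.List.pyGetD target p.1 0 then PySem.Set.add good p.1 else good)
          good)
      PySem.Set.empty
  good.length == 3

-- ===== PORT B =====
-- the comprehension filter `t[0] <= target[0] and t[1] <= target[1] and t[2] <= target[2]`
def pvKeep (target : List Int) (t : List Int) : Bool :=
  decide (PySem.List.pyGetD t 0 0 ≤ PySem.List.pyGetD target 0 0) &&
  decide (PySem.List.pyGetD t 1 0 ≤ PySem.List.pyGetD target 1 0) &&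
  decide (PySem.List.pyGetD t 2 0 ≤ PySem.List.pyGetD target 2 0)

def mergeTripletsNeet_alt (triplets : List (List Int)) (target : List Int) : Bool :=
  let valid := triplets.filter (pvKeep target)
  (PySem.List.pyRange 0 3 1).all (fun i =>
    valid.any (fun t => PySem.List.pyGetD t i 0 == PySem.List.pyGetD target i 0))

-- ===== PRECONDITION & SPEC =====
-- pvFilt? mirrors which indices Python's short-circuited filter line evaluates on one row:
-- some b = the filter evaluates to b without IndexError, none = it raises IndexError.
def pvFilt? : List Int → List Int → Option Bool
  | t0 :: t1 :: t2 :: _, g0 :: g1 :: g2 :: _ =>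
      if g0 < t0 then some true
      else if g1 < t1 then some true
      else some (decide (g2 < t2))
  | t0 :: t1 :: _, g0 :: g1 :: _ =>
      if g0 < t0 then some true
      else if g1 < t1 then some true
      else none
  | t0 :: _, g0 :: _ =>
      if g0 < t0 then some true else none
  | _, _ => none

-- Pre_ requires each row's filter line to evaluate without IndexError (otherwise A
-- raises) and every row that survives the filter to be a genuine length-3 triplet
-- (on malformed surviving rows A's enumerate-over-the-whole-row behaviour is an
-- accident of its implementation).
def Pre_mergeTripletsNeet (triplets : List (List Int)) (target : List Int) : Prop :=
  ∀ t ∈ triplets, pvFilt? t target ≠ none ∧ (pvFilt? t target = some false → t.length = 3)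
instance (triplets : List (List Int)) (target : List Int) : Decidable (Pre_mergeTripletsNeet triplets target) := by unfold Pre_mergeTripletsNeet; infer_instance

def pvWitness_mergeTripletsNeet : List (List Int) × List Int :=
  ([[2, 5, 3], [1, 8, 4], [1, 7, 5]], [2, 7, 5])

def Spec_mergeTripletsNeet (triplets : List (List Int)) (target : List Int) (out : Bool) : Prop := out = mergeTripletsNeet_alt triplets target
instance (triplets : List (List Int)) (target : List Int) (out : Bool) : Decidable (Spec_mergeTripletsNeet triplets target out) := by unfold Spec_mergeTripletsNeet; infer_instance

-- ===== CLAIM (what is proved, stated in full; the proofs are below) =====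
def Claim_equal_mergeTripletsNeet : Prop := ∀ (triplets : List (List Int)) (target : List Int), Dom_mergeTripletsNeet triplets target → Pre_mergeTripletsNeet triplets target → Spec_mergeTripletsNeet triplets target (mergeTripletsNeet triplets target)

-- ===== LEMMAS AND PROOFS =====

-- the state of A's inner `for i, n in enumerate(t)` loop, characterised
theorem pvInner (tg t : List Int) (s : Nat) (good : PySem.Set Int) (hnd : good.Nodup) :
    ((PySem.List.enumerate t (s : Int)).foldl
        (fun good p => if p.2 == PySem.List.pyGetD tg p.1 0 then PySem.Set.add good p.1 else good)
        good).Nodup ∧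
    ∀ i : Int,
      (i ∈ (PySem.List.enumerate t (s : Int)).foldl
          (fun good p => if p.2 == PySem.List.pyGetD tg p.1 0 then PySem.Set.add good p.1 else good)
          good) ↔
      i ∈ good ∨ ∃ k : Nat, k < t.length ∧ i = ((s + k : Nat) : Int) ∧ t.getD k 0 = tg.getD (s + k) 0 := by
  induction t generalizing s good with
  | nil =>
    refine ⟨by simpa [PySem.List.enumerate_nil] using hnd, fun i => ?_⟩
    simp [PySem.List.enumerate_nil]
  | cons x t ih =>
    rw [PySem.List.enumerate_cons]
    have hcast : (s : Int) + 1 = ((s + 1 : Nat) : Int) := by push_cast; ring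
    set g1 : PySem.Set Int :=
      if x == PySem.List.pyGetD tg (s : Int) 0 then PySem.Set.add good (s : Int) else good with hg1
    have hnd1 : g1.Nodup := by
      rw [hg1]; split_ifs
      · exact PySem.Set.nodup_add _ _ hnd
      · exact hnd
    have hm1 : ∀ i : Int, i ∈ g1 ↔ i ∈ good ∨ (i = (s : Int) ∧ x = tg.getD s 0) := by
      intro i
      rw [hg1]
      split_ifs with hx
      · rw [PySem.List.pyGetD_natCast, beq_iff_eq] at hx
        simp [PySem.Set.mem_add, hx]
      · rw [PySem.List.pyGetD_natCast, beq_iff_eq] at hx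
        constructor
        · exact fun h => Or.inl h
        · rintro (h | ⟨rfl, h⟩)
          · exact h
          · exact absurd h hx
    obtain ⟨N, M⟩ := ih (s + 1) g1 hnd1
    simp only [List.foldl_cons]
    rw [hcast, ← hg1]
    refine ⟨N, fun i => ?_⟩
    rw [M i, hm1 i]
    constructor
    · rintro ((h | ⟨rfl, hx⟩) | ⟨k, hk, rfl, hkeq⟩)
      · exact Or.inl h
      · exact Or.inr ⟨0, by simp, by simp, by simpa using hx⟩
      · refine Or.inr ⟨k + 1, by simpa using hk, by push_cast; ring, ?_⟩
        rw [List.getD_cons_succ, show s + (k + 1) = s + 1 + k by omega]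
        exact hkeq
    · rintro (h | ⟨k, hk, rfl, hkeq⟩)
      · exact Or.inl (Or.inl h)
      · cases k with
        | zero => exact Or.inl (Or.inr ⟨by simp, by simpa using hkeq⟩)
        | succ k =>
          refine Or.inr ⟨k, by simpa using hk, by push_cast; ring, ?_⟩
          rw [show s + 1 + k = s + (k + 1) by omega]
          rw [List.getD_cons_succ] at hkeq
          exact hkeq

-- the state of A's outer loop, characterised
theorem pvOuter (tg : List Int) (ts : List (List Int)) (good : PySem.Set Int) (hnd : good.Nodup)
    (Q : Int → Prop) (hQ : ∀ i, i ∈ good ↔ Q i) :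
    (ts.foldl (fun good t =>
      if PySem.List.pyGetD t 0 0 > PySem.List.pyGetD tg 0 0 ∨
         PySem.List.pyGetD t 1 0 > PySem.List.pyGetD tg 1 0 ∨
         PySem.List.pyGetD t 2 0 > PySem.List.pyGetD tg 2 0 then good
      else
        (PySem.List.enumerate t).foldl
          (fun good p => if p.2 == PySem.List.pyGetD tg p.1 0 then PySem.Set.add good p.1 else good)
          good) good).Nodup ∧
    ∀ i : Int,
      (i ∈ ts.foldl (fun good t =>
        if PySem.List.pyGetD t 0 0 > PySem.List.pyGetD tg 0 0 ∨
           PySem.List.pyGetD t 1 0 > PySem.List.pyGetD tg 1 0 ∨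
           PySem.List.pyGetD t 2 0 > PySem.List.pyGetD tg 2 0 then good
        else
          (PySem.List.enumerate t).foldl
            (fun good p => if p.2 == PySem.List.pyGetD tg p.1 0 then PySem.Set.add good p.1 else good)
            good) good) ↔
      Q i ∨ ∃ t ∈ ts, pvKeep tg t = true ∧ ∃ k : Nat, k < t.length ∧ i = (k : Int) ∧ t.getD k 0 = tg.getD k 0 := by
  induction ts generalizing good Q with
  | nil =>
    refine ⟨hnd, fun i => ?_⟩
    simp [hQ i]
  | cons t ts ih =>
    rw [List.foldl_cons]
    by_cases hc : PySem.List.pyGetD t 0 0 > PySem.List.pyGetD tg 0 0 ∨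
        PySem.List.pyGetD t 1 0 > PySem.List.pyGetD tg 1 0 ∨
        PySem.List.pyGetD t 2 0 > PySem.List.pyGetD tg 2 0
    · rw [if_pos hc]
      have hkeep : pvKeep tg t = false := by
        simp only [pvKeep, Bool.and_eq_false_iff, decide_eq_false_iff_not]
        rcases hc with h | h | h
        · exact Or.inl (Or.inl (by omega))
        · exact Or.inl (Or.inr (by omega))
        · exact Or.inr (by omega)
      obtain ⟨N, M⟩ := ih good hnd Q hQ
      refine ⟨N, fun i => ?_⟩
      rw [M i]
      constructor
      · rintro (h | ⟨u, hu, hk, hrest⟩)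
        · exact Or.inl h
        · exact Or.inr ⟨u, List.mem_cons_of_mem _ hu, hk, hrest⟩
      · rintro (h | ⟨u, hu, hk, hrest⟩)
        · exact Or.inl h
        · rcases List.mem_cons.mp hu with rfl | hu
          · rw [hkeep] at hk; cases hk
          · exact Or.inr ⟨u, hu, hk, hrest⟩
    · rw [if_neg hc]
      have hkeep : pvKeep tg t = true := by
        simp only [pvKeep, Bool.and_eq_true, decide_eq_true_eq]
        exact ⟨⟨by omega, by omega⟩, by omega⟩
      have hinner := pvInner tg t 0 good hnd
      have hz : PySem.List.enumerate t = PySem.List.enumerate t ((0 : Nat) : Int) := by norm_num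
      rw [hz]
      obtain ⟨N1, M1⟩ := hinner
      obtain ⟨N, M⟩ := ih _ N1 (fun i => i ∈ good ∨ ∃ k : Nat, k < t.length ∧ i = ((0 + k : Nat) : Int) ∧ t.getD k 0 = tg.getD (0 + k) 0) (fun i => M1 i)
      refine ⟨N, fun i => ?_⟩
      rw [M i]
      constructor
      · rintro ((h | ⟨k, hk, rfl, hkeq⟩) | ⟨u, hu, hk2, hrest⟩)
        · exact Or.inl ((hQ i).mp h)
        · exact Or.inr ⟨t, List.mem_cons_self, hkeep, k, hk, by simp, by simpa using hkeq⟩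
        · exact Or.inr ⟨u, List.mem_cons_of_mem _ hu, hk2, hrest⟩
      · rintro (h | ⟨u, hu, hk2, k, hk, rfl, hkeq⟩)
        · exact Or.inl (Or.inl ((hQ i).mpr h))
        · rcases List.mem_cons.mp hu with rfl | hu
          · exact Or.inl (Or.inr ⟨k, hk, by simp, by simpa using hkeq⟩)
          · exact Or.inr ⟨u, hu, hk2, k, hk, rfl, hkeq⟩

-- when the filter line evaluates, pvKeep is exactly "it evaluated to False (row kept)"
theorem pvKeepFilt (t tg : List Int) (h : pvFilt? t tg ≠ none) :
    pvKeep tg t = true ↔ pvFilt? t tg = some false := by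
  rcases t with _ | ⟨t0, _ | ⟨t1, _ | ⟨t2, tr⟩⟩⟩ <;>
    rcases tg with _ | ⟨g0, _ | ⟨g1, _ | ⟨g2, gr⟩⟩⟩ <;>
    simp_all [pvFilt?, pvKeep, PySem.List.pyGetD_ofNat'] <;>
    split_ifs at * <;> simp_all

-- a 3-element filter keeps everything iff its length is 3
theorem pvLen3 (p : Int → Bool) :
    ((([0, 1, 2] : List Int).filter p).length == 3) = ([0, 1, 2] : List Int).all p := by
  cases h0 : p 0 <;> cases h1 : p 1 <;> cases h2 : p 2 <;>
    simp [List.filter, List.all, h0, h1, h2]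

-- ===== VERDICT (by name: the statement is the Claim_ definition above) =====
theorem mergeTripletsNeet_spec : Claim_equal_mergeTripletsNeet := by
  intro triplets target _ hpre
  unfold Spec_mergeTripletsNeet mergeTripletsNeet mergeTripletsNeet_alt
  obtain ⟨N, M⟩ := pvOuter target triplets PySem.Set.empty List.nodup_nil (fun _ => False)
    (by intro i; simp [PySem.Set.empty])
  set valid := triplets.filter (pvKeep target) with hvalid
  set p : Int → Bool := fun i =>
    valid.any (fun t => PySem.List.pyGetD t i 0 == PySem.List.pyGetD target i 0) with hp
  have hr3 : PySem.List.pyRange 0 3 1 = ([0, 1, 2] : List Int) := by decide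
  have hmemc : ∀ i : Int, i ∈ ([0, 1, 2] : List Int).filter p ↔
      i ∈ ([0, 1, 2] : List Int) ∧ ∃ t ∈ valid,
        PySem.List.pyGetD t i 0 = PySem.List.pyGetD target i 0 := by
    intro i
    rw [List.mem_filter, hp]
    simp [List.any_eq_true]
  have hcnd : (([0, 1, 2] : List Int).filter p).Nodup :=
    List.Nodup.filter _ (by decide)
  have hperm : (triplets.foldl (fun good t =>
      if PySem.List.pyGetD t 0 0 > PySem.List.pyGetD target 0 0 ∨
         PySem.List.pyGetD t 1 0 > PySem.List.pyGetD target 1 0 ∨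
         PySem.List.pyGetD t 2 0 > PySem.List.pyGetD target 2 0 then good
      else
        (PySem.List.enumerate t).foldl
          (fun good p => if p.2 == PySem.List.pyGetD target p.1 0 then PySem.Set.add good p.1 else good)
          good) PySem.Set.empty).Perm (([0, 1, 2] : List Int).filter p) := by
    refine (List.perm_ext_iff_of_nodup N hcnd).mpr ?_
    intro i
    rw [M i, hmemc i]
    constructor
    · rintro (h | ⟨t, ht, hkeep, k, hk, rfl, hkeq⟩)
      · cases h
      · have hlen : t.length = 3 :=
          (hpre t ht).2 ((pvKeepFilt t target (hpre t ht).1).mp hkeep)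
        have htv : t ∈ valid := by rw [hvalid, List.mem_filter]; exact ⟨ht, hkeep⟩
        rw [hlen] at hk
        refine ⟨?_, t, htv, ?_⟩
        · interval_cases k <;> decide
        · rw [PySem.List.pyGetD_natCast, PySem.List.pyGetD_natCast]
          exact hkeq
    · rintro ⟨hi, t, htv, heq⟩
      have h0 : 0 ≤ i ∧ i < 3 := by
        simp only [List.mem_cons, List.not_mem_nil, or_false] at hi
        rcases hi with rfl | rfl | rfl <;> norm_num
      rw [hvalid, List.mem_filter] at htv
      have hlen : t.length = 3 :=
        (hpre t htv.1).2 ((pvKeepFilt t target (hpre t htv.1).1).mp htv.2)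
      refine Or.inr ⟨t, htv.1, htv.2, i.toNat, by omega, (Int.toNat_of_nonneg h0.1).symm, ?_⟩
      rw [← Int.toNat_of_nonneg h0.1, PySem.List.pyGetD_natCast, PySem.List.pyGetD_natCast] at heq
      exact heq
  simp only []
  rw [hperm.length_eq, hr3, pvLen3]
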